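-- pv_equiv track=rewrite | github.com/JoelGau/S8_AI | APP2/scripts/optimize-ga/sexy_time.py | sexy_time3
-- ===== SOURCE A (Python) =====
-- def sexy_time3(p1,p2,nb_premier = 3):
--     kid1 = {}
--     kid2 = {}
--     i = 0
--     for key in p1.keys():
--         if i < nb_premier:
--             kid1[key] = p1[key]
--             kid2[key] = p2[key]
--         else:
--             kid1[key] = p2[key]
--             kid2[key] = p1[key]
--         i+=1
--
--     return (kid1, kid2)
-- ===== SOURCE B (Python) =====
-- def sexy_time3(p1, p2, nb_premier=3):
--     keys = list(p1)
--     cut = nb_premier if nb_premier > 0 else 0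
--     head, tail = keys[:cut], keys[cut:]
--     kid1 = {**{k: p1[k] for k in head}, **{k: p2[k] for k in tail}}
--     kid2 = {**{k: p2[k] for k in head}, **{k: p1[k] for k in tail}}
--     return (kid1, kid2)
-- ===== Notes on version B (the rewrite author's own statement) =====
-- stated objective: alternative
-- what changed: Replaces the single counter-indexed loop with one if/else per key by partitioning the key list at the clamped threshold via slicing and building each kid from two branch-free comprehensions merged together.
-- outside the precondition, e.g. on sexy_time3({'a': 1}, {}, 0): A raises KeyError, B raises KeyError
import Mathlib
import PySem

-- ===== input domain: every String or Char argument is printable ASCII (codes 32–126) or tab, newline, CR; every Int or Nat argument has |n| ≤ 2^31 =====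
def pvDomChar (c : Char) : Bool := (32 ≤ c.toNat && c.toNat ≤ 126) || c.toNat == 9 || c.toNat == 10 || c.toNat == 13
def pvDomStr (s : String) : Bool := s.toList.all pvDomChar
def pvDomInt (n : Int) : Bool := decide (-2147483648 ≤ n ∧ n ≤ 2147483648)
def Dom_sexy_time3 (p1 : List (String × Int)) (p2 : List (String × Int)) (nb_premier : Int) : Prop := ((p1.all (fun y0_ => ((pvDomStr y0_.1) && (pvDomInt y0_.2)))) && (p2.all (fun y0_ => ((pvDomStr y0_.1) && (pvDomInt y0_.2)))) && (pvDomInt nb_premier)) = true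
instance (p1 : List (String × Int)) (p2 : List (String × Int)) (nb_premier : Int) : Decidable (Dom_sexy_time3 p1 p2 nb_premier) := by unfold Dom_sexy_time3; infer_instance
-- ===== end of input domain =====

-- B partitions p1's key list at the clamped threshold with slices and builds each kid from two
-- branch-free mapped passes (merged dict comprehensions) instead of A's counter-indexed branched loop.


-- ===== PORT A =====
-- kid1/kid2 are Python dicts built by item assignment; p1[key]/p2[key] are dict lookups
-- (getD 0 is only reached when p2 lacks the key, which Pre_ excludes — Python raises KeyError there).
def sexy_time3 (p1 : List (String × Int)) (p2 : List (String × Int)) (nb_premier : Int) : (List (String × Int)) × (List (String × Int)) :=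
  let st := (p1.map Prod.fst).foldl
    (fun (st : PySem.Dict String Int × PySem.Dict String Int × Int) key =>
      if st.2.2 < nb_premier then
        (st.1.insert key ((PySem.Dict.mk p1).getD key 0),
         st.2.1.insert key ((PySem.Dict.mk p2).getD key 0), st.2.2 + 1)
      else
        (st.1.insert key ((PySem.Dict.mk p2).getD key 0),
         st.2.1.insert key ((PySem.Dict.mk p1).getD key 0), st.2.2 + 1))
    (PySem.Dict.empty, PySem.Dict.empty, 0)
  (st.1.items, st.2.1.items)

-- ===== PORT B =====
def sexy_time3_alt (p1 : List (String × Int)) (p2 : List (String × Int)) (nb_premier : Int) : (List (String × Int)) × (List (String × Int)) :=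
  let keys := p1.map Prod.fst
  let cut : Int := if nb_premier > 0 then nb_premier else 0
  let head := PySem.List.slice keys none (some cut)
  let tail := PySem.List.slice keys (some cut) none
  (head.map (fun k => (k, (PySem.Dict.mk p1).getD k 0)) ++ tail.map (fun k => (k, (PySem.Dict.mk p2).getD k 0)),
   head.map (fun k => (k, (PySem.Dict.mk p2).getD k 0)) ++ tail.map (fun k => (k, (PySem.Dict.mk p1).getD k 0)))

-- ===== PRECONDITION & SPEC =====
-- Pre_ excludes lists whose p1 keys are not all present in p2 (A raises KeyError there) and lists
-- with duplicate keys, which do not represent any Python dict (a dict's keys are unique).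
def Pre_sexy_time3 (p1 : List (String × Int)) (p2 : List (String × Int)) (nb_premier : Int) : Prop :=
  (p1.map Prod.fst).Nodup ∧ (p2.map Prod.fst).Nodup ∧ ∀ k ∈ p1.map Prod.fst, k ∈ p2.map Prod.fst
instance (p1 : List (String × Int)) (p2 : List (String × Int)) (nb_premier : Int) : Decidable (Pre_sexy_time3 p1 p2 nb_premier) := by unfold Pre_sexy_time3; infer_instance
def pvWitness_sexy_time3 : (List (String × Int)) × (List (String × Int)) × Int :=
  ([("a", 1), ("b", 2), ("c", 3), ("d", 4)], [("a", 5), ("b", 6), ("c", 7), ("d", 8)], 2)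
def Spec_sexy_time3 (p1 : List (String × Int)) (p2 : List (String × Int)) (nb_premier : Int) (out : (List (String × Int)) × (List (String × Int))) : Prop := out = sexy_time3_alt p1 p2 nb_premier
instance (p1 : List (String × Int)) (p2 : List (String × Int)) (nb_premier : Int) (out : (List (String × Int)) × (List (String × Int))) : Decidable (Spec_sexy_time3 p1 p2 nb_premier out) := by unfold Spec_sexy_time3; infer_instance

-- ===== CLAIM (what is proved, stated in full; the proofs are below) =====
def Claim_equal_sexy_time3 : Prop := ∀ (p1 : List (String × Int)) (p2 : List (String × Int)) (nb_premier : Int), Dom_sexy_time3 p1 p2 nb_premier → Pre_sexy_time3 p1 p2 nb_premier → Spec_sexy_time3 p1 p2 nb_premier (sexy_time3 p1 p2 nb_premier)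

-- ===== LEMMAS AND PROOFS =====

theorem pv_fresh_insert {d : PySem.Dict String Int} {k v} (rest : List String)
    (hne : k ∉ rest) (h : ∀ x ∈ rest, d.contains x = false) :
    ∀ x ∈ rest, (d.insert k v).contains x = false := by
  intro x hx
  rw [PySem.Dict.contains_insert]
  have hxk : x ≠ k := by rintro rfl; exact hne hx
  simp [hxk, h x hx]

theorem sexy_time3_loop_items (g1 g2 : String → Int) (nb : Int) :
    ∀ (keys : List String) (d1 d2 : PySem.Dict String Int) (i : Int),
      keys.Nodup →
      (∀ k ∈ keys, d1.contains k = false) →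
      (∀ k ∈ keys, d2.contains k = false) →
      (keys.foldl
        (fun (st : PySem.Dict String Int × PySem.Dict String Int × Int) key =>
          if st.2.2 < nb then
            (st.1.insert key (g1 key), st.2.1.insert key (g2 key), st.2.2 + 1)
          else
            (st.1.insert key (g2 key), st.2.1.insert key (g1 key), st.2.2 + 1))
        (d1, d2, i)).1.items
        = d1.items ++ ((keys.take (nb - i).toNat).map (fun k => (k, g1 k))
                   ++ (keys.drop (nb - i).toNat).map (fun k => (k, g2 k))) ∧
      (keys.foldl
        (fun (st : PySem.Dict String Int × PySem.Dict String Int × Int) key =>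
          if st.2.2 < nb then
            (st.1.insert key (g1 key), st.2.1.insert key (g2 key), st.2.2 + 1)
          else
            (st.1.insert key (g2 key), st.2.1.insert key (g1 key), st.2.2 + 1))
        (d1, d2, i)).2.1.items
        = d2.items ++ ((keys.take (nb - i).toNat).map (fun k => (k, g2 k))
                   ++ (keys.drop (nb - i).toNat).map (fun k => (k, g1 k))) := by
  intro keys
  induction keys with
  | nil => intro d1 d2 i _ _ _; simp
  | cons k rest ih =>
    intro d1 d2 i hnd h1 h2
    obtain ⟨hkrest, hndr⟩ := List.nodup_cons.mp hnd
    have hk1 : d1.contains k = false := h1 k (by simp)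
    have hk2 : d2.contains k = false := h2 k (by simp)
    have h1r : ∀ x ∈ rest, d1.contains x = false := fun x hx => h1 x (List.mem_cons_of_mem _ hx)
    have h2r : ∀ x ∈ rest, d2.contains x = false := fun x hx => h2 x (List.mem_cons_of_mem _ hx)
    by_cases hlt : i < nb
    · have hm : (nb - i).toNat = (nb - (i + 1)).toNat + 1 := by omega
      have := ih (d1.insert k (g1 k)) (d2.insert k (g2 k)) (i + 1) hndr
        (pv_fresh_insert rest hkrest h1r) (pv_fresh_insert rest hkrest h2r)
      simp only [List.foldl_cons, hlt, if_true]
      rw [hm]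
      simp only [List.take_succ_cons, List.drop_succ_cons, List.map_cons]
      rw [this.1, this.2, PySem.Dict.items_insert_of_not_contains _ _ hk1,
          PySem.Dict.items_insert_of_not_contains _ _ hk2]
      constructor <;> simp
    · have hm0 : (nb - i).toNat = 0 := by omega
      have hm1 : (nb - (i + 1)).toNat = 0 := by omega
      have := ih (d1.insert k (g2 k)) (d2.insert k (g1 k)) (i + 1) hndr
        (pv_fresh_insert rest hkrest h1r) (pv_fresh_insert rest hkrest h2r)
      simp only [List.foldl_cons, if_neg hlt]
      rw [hm0]
      simp only [List.take_zero, List.drop_zero, List.map_cons, List.map_nil]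
      rw [this.1, this.2, hm1, PySem.Dict.items_insert_of_not_contains _ _ hk1,
          PySem.Dict.items_insert_of_not_contains _ _ hk2]
      simp

-- ===== VERDICT (by name: the statement is the Claim_ definition above) =====
theorem sexy_time3_spec : Claim_equal_sexy_time3 := by
  intro p1 p2 nb _ hpre
  unfold Spec_sexy_time3 sexy_time3 sexy_time3_alt
  obtain ⟨hnd, -, -⟩ := hpre
  have h := sexy_time3_loop_items (fun k => (PySem.Dict.mk p1).getD k 0)
    (fun k => (PySem.Dict.mk p2).getD k 0) nb (p1.map Prod.fst)
    PySem.Dict.empty PySem.Dict.empty 0 hnd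
    (by intro k _; simp) (by intro k _; simp)
  have hz : (nb - 0 : Int) = nb := by omega
  rw [hz] at h
  have hcut : (if nb > 0 then nb else 0) = ((nb.toNat : Int)) := by
    split_ifs with hp <;> omega
  dsimp only
  rw [hcut, PySem.List.slice_to_natCast, PySem.List.slice_from_natCast, Prod.mk.injEq]
  refine ⟨?_, ?_⟩
  · rw [h.1]; simp [PySem.Dict.empty]
  · rw [h.2]; simp [PySem.Dict.empty]
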